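-- pv_equiv track=rewrite | github.com/JavierSanchez-Utges/LIGYSIS-custom | fragsys_custom.py | get_residue_bs_membership
-- ===== SOURCE A (Python) =====
-- def get_residue_bs_membership(cluster_ress):
--     """
--     Returns a dictionary indicating to which ligand binding
--     site each ligand binding residue is found in. A residue
--     might contribute to more than one adjacent binding site.
--     """
--     all_bs_ress = []
--     for v in cluster_ress.values():
--         all_bs_ress.extend(v)
--     all_bs_ress = sorted(list(set(all_bs_ress)))
--
--     bs_ress_membership_dict = {}
--     for bs_res in all_bs_ress:
--         bs_ress_membership_dict[bs_res] = []
--         for k, v in cluster_ress.items():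
--             if bs_res in v:
--                 bs_ress_membership_dict[bs_res].append(k) # which binding site each residue belongs to
--     return bs_ress_membership_dict
-- ===== SOURCE B (Python) =====
-- def get_residue_bs_membership(cluster_ress):
--     """
--     Returns a dictionary indicating to which ligand binding
--     site each ligand binding residue is found in. A residue
--     might contribute to more than one adjacent binding site.
--     """
--     inv = {}
--     for k, v in cluster_ress.items():
--         for res in dict.fromkeys(v):  # distinct residues of this site, in order
--             inv.setdefault(res, []).append(k)
--     return {res: inv[res] for res in sorted(inv)}
-- ===== Notes on version B (the rewrite author's own statement) =====
-- stated objective: faster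
-- what changed: Replaces the per-residue rescan of every cluster (for each residue, loop over all clusters testing membership) by a single-pass inversion that appends the cluster key to each distinct residue's list, then emits the entries in sorted residue order.
import Mathlib
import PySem

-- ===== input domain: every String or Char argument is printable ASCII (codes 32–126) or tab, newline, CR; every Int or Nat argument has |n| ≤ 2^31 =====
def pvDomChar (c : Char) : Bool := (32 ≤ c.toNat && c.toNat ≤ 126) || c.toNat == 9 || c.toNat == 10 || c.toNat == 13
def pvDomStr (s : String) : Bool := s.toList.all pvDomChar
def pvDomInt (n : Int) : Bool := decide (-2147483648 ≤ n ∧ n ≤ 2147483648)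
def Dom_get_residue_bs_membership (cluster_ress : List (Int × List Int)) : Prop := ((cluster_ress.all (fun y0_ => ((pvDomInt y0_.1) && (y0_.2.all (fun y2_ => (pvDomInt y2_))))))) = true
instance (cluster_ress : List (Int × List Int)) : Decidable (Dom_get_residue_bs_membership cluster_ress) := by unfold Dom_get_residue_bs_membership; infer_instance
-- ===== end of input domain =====

-- B replaces A's per-residue rescan of every cluster by a single-pass inversion of the
-- cluster→residues map followed by a sort of the residue keys (objective: faster).

-- ===== PORT A =====
def get_residue_bs_membership (cluster_ress : List (Int × List Int)) : List (Int × List Int) :=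
  -- all_bs_ress = []; for v in cluster_ress.values(): all_bs_ress.extend(v)
  let all_bs_ress : List Int := cluster_ress.foldl (fun acc kv => acc ++ kv.2) []
  -- all_bs_ress = sorted(list(set(all_bs_ress)))
  let all_bs_ress : List Int := PySem.List.sorted (PySem.Set.ofList all_bs_ress) (fun x => x) false
  -- bs_ress_membership_dict = {}; for bs_res in all_bs_ress: … ; return it
  let d : PySem.Dict Int (List Int) :=
    all_bs_ress.foldl (fun d bs_res =>
      cluster_ress.foldl (fun d kv =>
        if kv.2.contains bs_res then d.modify bs_res [] (fun l => l ++ [kv.1]) else d)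
        (d.insert bs_res []))
      PySem.Dict.empty
  d.items

-- ===== PORT B =====
def get_residue_bs_membership_alt (cluster_ress : List (Int × List Int)) : List (Int × List Int) :=
  -- inv = {}; for k, v in cluster_ress.items(): for res in dict.fromkeys(v): inv.setdefault(res, []).append(k)
  let inv : PySem.Dict Int (List Int) :=
    cluster_ress.foldl (fun d kv =>
      (PySem.List.dedup kv.2).foldl (fun d res => d.modify res [] (fun l => l ++ [kv.1])) d)
      PySem.Dict.empty
  -- return {res: inv[res] for res in sorted(inv)}
  (PySem.List.sorted inv.keys (fun x => x) false).map (fun res => (res, inv.getD res []))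

-- ===== PRECONDITION & SPEC =====
def Spec_get_residue_bs_membership (cluster_ress : List (Int × List Int)) (out : List (Int × List Int)) : Prop := out = get_residue_bs_membership_alt cluster_ress
instance (cluster_ress : List (Int × List Int)) (out : List (Int × List Int)) : Decidable (Spec_get_residue_bs_membership cluster_ress out) := by unfold Spec_get_residue_bs_membership; infer_instance

-- ===== CLAIM (what is proved, stated in full; the proofs are below) =====
def Claim_equal_get_residue_bs_membership : Prop := ∀ (cluster_ress : List (Int × List Int)), Dom_get_residue_bs_membership cluster_ress → Spec_get_residue_bs_membership cluster_ress (get_residue_bs_membership cluster_ress)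

-- ===== LEMMAS AND PROOFS =====

-- the membership list of residue r: keys of the clusters whose residue list contains r, in order
def pvTgt (cluster_ress : List (Int × List Int)) (r : Int) : List Int :=
  (cluster_ress.filter (fun kv => kv.2.contains r)).map (·.1)

theorem insert_insert_same {ν : Type} (d : PySem.Dict Int ν) (k : Int) (v w : ν) :
    (d.insert k v).insert k w = d.insert k w := by
  have h2 : (d.insert k v).contains k = true := PySem.Dict.contains_insert_self d k v
  by_cases hc : d.contains k = true
  · simp only [PySem.Dict.insert, hc, if_true] at h2 ⊢
    simp only [h2, if_true, List.map_map]
    congr 1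
    apply List.map_congr_left
    intro p _
    by_cases hp : p.1 = k <;> simp [hp]
  · simp only [PySem.Dict.insert, hc, Bool.false_eq_true, if_false] at h2 ⊢
    simp only [h2, if_true]
    simp only [PySem.Dict.contains, Bool.not_eq_true, List.any_eq_false] at hc
    congr 1
    rw [List.map_append]
    simp only [List.map_cons, List.map_nil, beq_self_eq_true, if_true]
    congr 1
    conv_rhs => rw [← List.map_id d.items]
    apply List.map_congr_left
    intro p hp
    have h3 := hc p hp
    simp only [beq_eq_false_iff_ne, ne_eq] at h3
    simp [h3]

theorem insert_getD_self {ν : Type} (d : PySem.Dict Int ν) (k : Int) (dflt : ν)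
    (hnd : d.keys.Nodup) (hc : d.contains k = true) :
    d.insert k (d.getD k dflt) = d := by
  simp only [PySem.Dict.insert, hc, if_true]
  cases d with
  | mk items =>
    congr 1
    conv_rhs => rw [← List.map_id items]
    apply List.map_congr_left
    intro p hp
    by_cases hk : (p.1 == k) = true
    · simp only [hk, if_true, id]
      have hkk : p.1 = k := by simpa using hk
      have hmem : (k, p.2) ∈ (PySem.Dict.mk items).items := by
        simpa [← hkk] using hp
      rw [PySem.Dict.getD_of_mem_items _ hmem hnd dflt, ← hkk]
    · simp [hk]

theorem innerA (cluster_ress : List (Int × List Int)) (r : Int)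
    (d : PySem.Dict Int (List Int)) (hnd : d.keys.Nodup) (hc : d.contains r = true) :
    cluster_ress.foldl (fun d kv =>
        if kv.2.contains r then d.modify r [] (fun l => l ++ [kv.1]) else d) d
      = d.insert r (d.getD r [] ++ pvTgt cluster_ress r) := by
  induction cluster_ress generalizing d with
  | nil => simp [pvTgt, insert_getD_self d r [] hnd hc]
  | cons kv l ih =>
    by_cases hm : kv.2.contains r = true
    · have hm' : r ∈ kv.2 := by simpa using hm
      have step : (if kv.2.contains r = true then d.modify r [] (fun l => l ++ [kv.1]) else d)
          = d.insert r (d.getD r [] ++ [kv.1]) := by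
        simp [hm', PySem.Dict.modify]
      rw [List.foldl_cons, step,
        ih _ (PySem.Dict.nodup_keys_insert _ _ _ hnd) (PySem.Dict.contains_insert_self d r _)]
      rw [PySem.Dict.getD_insert_self, insert_insert_same]
      simp [pvTgt, hm']
    · have hm' : ¬ r ∈ kv.2 := by simpa using hm
      have step : (if kv.2.contains r = true then d.modify r [] (fun l => l ++ [kv.1]) else d) = d := by
        simp [hm']
      rw [List.foldl_cons, step, ih _ hnd hc]
      simp [pvTgt, hm']

theorem outerA (cluster_ress : List (Int × List Int)) (rs : List Int)
    (d : PySem.Dict Int (List Int)) (hnd : d.keys.Nodup) (hrs : rs.Nodup)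
    (hdis : ∀ r ∈ rs, d.contains r = false) :
    (rs.foldl (fun d bs_res =>
        cluster_ress.foldl (fun d kv =>
          if kv.2.contains bs_res then d.modify bs_res [] (fun l => l ++ [kv.1]) else d)
          (d.insert bs_res [])) d).items
      = d.items ++ rs.map (fun r => (r, pvTgt cluster_ress r)) := by
  induction rs generalizing d with
  | nil => simp
  | cons r rs ih =>
    simp only [List.foldl_cons, List.map_cons]
    have hcr : d.contains r = false := hdis r (by simp)
    rw [innerA cluster_ress r _ (PySem.Dict.nodup_keys_insert _ _ _ hnd)
        (PySem.Dict.contains_insert_self d r _)]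
    rw [insert_insert_same, PySem.Dict.getD_insert_self]
    have hrmem : r ∉ rs := (List.nodup_cons.mp hrs).1
    rw [ih (d.insert r ([] ++ pvTgt cluster_ress r))
        (PySem.Dict.nodup_keys_insert _ _ _ hnd) (List.nodup_cons.mp hrs).2
        (by
          intro r' hr'
          rw [PySem.Dict.contains_insert]
          have : r' ≠ r := fun h => hrmem (h ▸ hr')
          simp [this, hdis r' (List.mem_cons_of_mem _ hr')])]
    rw [PySem.Dict.items_insert_of_not_contains d _ hcr]
    simp

theorem dedup_pairs (v : List Int) (k r : Int) :
    (((PySem.List.dedup v).map (fun res => (res, k))).filter (fun p => p.1 == r)).map (·.2)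
      = if r ∈ v then [k] else [] := by
  rw [List.filter_map]
  have : ((fun (p : Int × Int) => p.1 == r) ∘ (fun res => (res, k))) = fun res => res == r := rfl
  rw [this, List.filter_beq]
  by_cases hm : r ∈ v
  · have h1 : (PySem.List.dedup v).count r = 1 :=
      List.count_eq_one_of_mem (PySem.List.nodup_dedup v) ((PySem.List.mem_dedup v r).mpr hm)
    rw [h1]
    simp [hm]
  · have h0 : (PySem.List.dedup v).count r = 0 :=
      List.count_eq_zero.mpr (fun h => hm ((PySem.List.mem_dedup v r).mp h))
    rw [h0]
    simp [hm]

theorem invB_getD_gen (l : List (Int × List Int)) (r : Int) (d : PySem.Dict Int (List Int)) :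
    (l.foldl (fun d kv =>
        (PySem.List.dedup kv.2).foldl (fun d res => d.modify res [] (fun l => l ++ [kv.1])) d) d).getD r []
      = d.getD r [] ++ pvTgt l r := by
  induction l generalizing d with
  | nil => simp [pvTgt]
  | cons kv l ih =>
    rw [List.foldl_cons, ih]
    have hstep : ((PySem.List.dedup kv.2).foldl (fun d res => d.modify res [] (fun l => l ++ [kv.1])) d)
        = (((PySem.List.dedup kv.2).map (fun res => (res, kv.1))).foldl
            (fun d p => d.modify p.1 [] (fun l => l ++ [p.2])) d) := by
      rw [List.foldl_map]
    rw [hstep, PySem.Dict.getD_foldl_modify_append, dedup_pairs]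
    by_cases hm : r ∈ kv.2
    · simp [pvTgt, hm]
    · simp [pvTgt, hm]

theorem invB_keys_gen (l : List (Int × List Int)) (d : PySem.Dict Int (List Int))
    (hnd : d.keys.Nodup) :
    (l.foldl (fun d kv =>
        (PySem.List.dedup kv.2).foldl (fun d res => d.modify res [] (fun l => l ++ [kv.1])) d) d).keys.Nodup
    ∧ (∀ r : Int, r ∈ (l.foldl (fun d kv =>
        (PySem.List.dedup kv.2).foldl (fun d res => d.modify res [] (fun l => l ++ [kv.1])) d) d).keys
        ↔ r ∈ d.keys ∨ ∃ kv ∈ l, r ∈ kv.2) := by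
  induction l generalizing d with
  | nil => exact ⟨hnd, by simp⟩
  | cons kv l ih =>
    rw [List.foldl_cons]
    have hk : ((PySem.List.dedup kv.2).foldl (fun d res => d.modify res [] (fun l => l ++ [kv.1])) d).keys
        = PySem.Set.update d.keys (PySem.List.dedup kv.2) :=
      PySem.Dict.keys_foldl_modify (PySem.List.dedup kv.2) [] (fun _ _ => fun l => l ++ [kv.1]) d
    have hnd' : ((PySem.List.dedup kv.2).foldl (fun d res => d.modify res [] (fun l => l ++ [kv.1])) d).keys.Nodup := by
      rw [hk]; exact PySem.Set.nodup_update _ _ hnd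
    obtain ⟨h1, h2⟩ := ih _ hnd'
    refine ⟨h1, fun r => ?_⟩
    rw [h2, hk, PySem.Set.mem_update]
    simp only [PySem.List.mem_dedup]
    constructor
    · rintro ((h | h) | h)
      · exact Or.inl h
      · exact Or.inr ⟨kv, by simp, h⟩
      · obtain ⟨kv', hkv', hr⟩ := h
        exact Or.inr ⟨kv', by simp [hkv'], hr⟩
    · rintro (h | ⟨kv', hkv', hr⟩)
      · exact Or.inl (Or.inl h)
      · rcases List.mem_cons.mp hkv' with h | h
        · exact Or.inl (Or.inr (h ▸ hr))
        · exact Or.inr ⟨kv', h, hr⟩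

theorem sorted_keys_eq (cluster_ress : List (Int × List Int)) :
    PySem.List.sorted (cluster_ress.foldl (fun d kv =>
        (PySem.List.dedup kv.2).foldl (fun d res => d.modify res [] (fun l => l ++ [kv.1])) d)
        PySem.Dict.empty).keys (fun x => x) false
      = PySem.List.sorted (PySem.Set.ofList (cluster_ress.foldl (fun acc kv => acc ++ kv.2) []))
          (fun x => x) false := by
  obtain ⟨hnd, hmem⟩ := invB_keys_gen cluster_ress PySem.Dict.empty (by simp [PySem.Dict.empty, PySem.Dict.keys])
  apply PySem.List.sorted_eq_sorted_of_perm _ _ _ (fun a b h => h)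
  rw [List.perm_ext_iff_of_nodup hnd (PySem.Set.nodup_ofList _)]
  intro r
  rw [hmem, PySem.Set.mem_ofList, PySem.List.foldl_append_eq_flatMap (fun kv => kv.2) cluster_ress []]
  simp [List.mem_flatMap]

theorem sorted_all_nodup (cluster_ress : List (Int × List Int)) :
    (PySem.List.sorted (PySem.Set.ofList (cluster_ress.foldl (fun acc kv => acc ++ kv.2) []))
        (fun x => x) false).Nodup := by
  have := PySem.List.sorted_ofList_pairwise_lt
    (κ := Int) (cluster_ress.foldl (fun acc kv => acc ++ kv.2) [])
  exact this.imp (fun h => ne_of_lt h)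

-- ===== VERDICT (by name: the statement is the Claim_ definition above) =====
theorem get_residue_bs_membership_spec : Claim_equal_get_residue_bs_membership := by
  intro cluster_ress _
  show get_residue_bs_membership cluster_ress = get_residue_bs_membership_alt cluster_ress
  unfold get_residue_bs_membership get_residue_bs_membership_alt
  simp only []
  rw [outerA cluster_ress _ PySem.Dict.empty (by simp [PySem.Dict.empty, PySem.Dict.keys])
      (sorted_all_nodup cluster_ress)
      (fun r _ => PySem.Dict.contains_empty r)]
  rw [sorted_keys_eq cluster_ress]
  simp only [PySem.Dict.empty, List.nil_append]
  apply List.map_congr_left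
  intro r _
  rw [invB_getD_gen]
  simp [PySem.Dict.getD, PySem.Dict.get?]
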